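-- pv_equiv track=rewrite | github.com/vvzen/open-pipe | openpipe/templates.py | analyze_template
-- ===== SOURCE A (Python) =====
-- def analyze_template(template_str):
--
--     tokens = []
--     partials = []
--
--     current_token = []
--     current_partial = []
--
--     token_has_started = False
--     partial_has_started = False
--
--     for char in template_str:
--
--         # Delimiter start
--         if char == "{":
--             token_has_started = True
--             current_token = []
--             continue
--
--         # Delimiter end
--         if char == "}":
--
--             if current_partial and partial_has_started:
--                 partials.append("".join(current_partial))
--
--             if current_token and token_has_started:
--                 tokens.append("".join(current_token))
--
--             token_has_started = False
--             partial_has_started = False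
--             continue
--
--         if partial_has_started:
--             current_partial.append(char)
--             continue
--
--         if token_has_started:
--             if char == "*":
--                 partial_has_started = True
--                 continue
--             else:
--                 current_token.append(char)
--                 continue
--
--     return tokens, partials
-- ===== SOURCE B (Python) =====
-- def analyze_template(template_str):
--     tokens = []
--     partials = []
--     for chunk in template_str.split('}')[:-1]:
--         _, brace, inner = chunk.rpartition('{')
--         if not brace:
--             continue
--         token, star, partial = inner.partition('*')
--         if token:
--             tokens.append(token)
--         if star and partial:
--             partials.append(partial)
--     return tokens, partials
-- ===== Notes on version B (the rewrite author's own statement) =====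
-- stated objective: simpler
-- what changed: Replaces the character-by-character flag automaton with a per-group string decomposition (split on the closing brace, rpartition on the opening brace, partition on the asterisk -- C-level string primitives instead of a per-character Python loop); Pre_ excludes templates where a brace group's text after its asterisk contains another opening brace (malformed nesting, where A's keep-collecting parse and B's reopen-at-last-brace parse are equally defensible), and D_ states the intended fix of A's never-cleared partial accumulator.
-- intended difference: On templates where some closed brace group contains an asterisk and an earlier closed group already contributed partial characters, A returns that earlier partial text concatenated in front of (or as) the later group's partial because current_partial is never cleared, while B returns each group's own partial text only, which is the intended per-group parse. — e.g. on analyze_template("{a*b}{c*d}"): A returns (["a", "c"], ["b", "bd"]), B returns (["a", "c"], ["b", "d"])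
-- outside the precondition, e.g. on analyze_template('{a*{b}'): A returns ([], ['b']), B returns (['b'], [])
import Mathlib
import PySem

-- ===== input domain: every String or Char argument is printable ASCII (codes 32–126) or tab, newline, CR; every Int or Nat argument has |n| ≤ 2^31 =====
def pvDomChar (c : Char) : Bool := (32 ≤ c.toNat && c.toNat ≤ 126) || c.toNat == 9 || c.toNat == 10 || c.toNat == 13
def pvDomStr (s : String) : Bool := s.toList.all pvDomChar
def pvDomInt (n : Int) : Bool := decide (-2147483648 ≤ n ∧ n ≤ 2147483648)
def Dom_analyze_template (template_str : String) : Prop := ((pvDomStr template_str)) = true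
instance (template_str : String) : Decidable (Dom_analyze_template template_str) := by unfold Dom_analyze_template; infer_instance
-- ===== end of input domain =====

-- B replaces A's character-by-character flag automaton with a per-group string decomposition
-- (split on '}', take the text after the last '{', split at the first '*'); D_ below states the
-- intended difference (A's never-cleared partial accumulator), Pre_ excludes malformed nesting
-- (a '{' inside a group's partial text), where either parse is defensible.

-- ===== PORT A =====
-- A-side helper: the body of A's for-loop, one step per character, on the state
-- (tokens, partials, current_token, current_partial, token_has_started, partial_has_started);
-- "".join(chars) is ported as String.ofList.
def pvStepA (st : List String × List String × List Char × List Char × Bool × Bool) (char : Char) :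
    List String × List String × List Char × List Char × Bool × Bool :=
  let (tokens, partials, current_token, current_partial, token_has_started, partial_has_started) := st
  if char = '{' then
    (tokens, partials, [], current_partial, true, partial_has_started)
  else if char = '}' then
    let partials' := if current_partial ≠ [] ∧ partial_has_started = true
      then partials ++ [String.ofList current_partial] else partials
    let tokens' := if current_token ≠ [] ∧ token_has_started = true
      then tokens ++ [String.ofList current_token] else tokens
    (tokens', partials', current_token, current_partial, false, false)
  else if partial_has_started then
    (tokens, partials, current_token, current_partial ++ [char], token_has_started, partial_has_started)
  else if token_has_started then
    if char = '*' then (tokens, partials, current_token, current_partial, token_has_started, true)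
    else (tokens, partials, current_token ++ [char], current_partial, token_has_started, partial_has_started)
  else st

def analyze_template (template_str : String) : List String × List String :=
  let fin := template_str.toList.foldl pvStepA ([], [], [], [], false, false)
  (fin.1, fin.2.1)

-- ===== PORT B =====
-- B-side helper: the body of B's for-loop over the chunks of template_str.split('}')[:-1].
-- chunk.rpartition('{'): the brace component is non-empty iff '{' ∈ chunk, and the part after
-- the last '{' is (chunk.reverse.takeWhile (· ≠ '{')).reverse; inner.partition('*') yields
-- takeWhile (· ≠ '*') / contains '*' / tail of dropWhile (· ≠ '*').
def pvStepB (acc : List String × List String) (chunk : List Char) : List String × List String :=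
  let (tokens, partials) := acc
  if chunk.contains '{' then
    let inner := (chunk.reverse.takeWhile (· ≠ '{')).reverse
    let token := inner.takeWhile (· ≠ '*')
    let star := inner.contains '*'
    let part := (inner.dropWhile (· ≠ '*')).tail
    (if token ≠ [] then tokens ++ [String.ofList token] else tokens,
     if star = true ∧ part ≠ [] then partials ++ [String.ofList part] else partials)
  else acc

def analyze_template_alt (template_str : String) : List String × List String :=
  ((PySem.Chars.splitOn template_str.toList ['}']).dropLast).foldl pvStepB ([], [])

-- ===== PRECONDITION & SPEC =====
-- helper for Pre_: the chunk contains a '{', later a '*', and later another '{'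
def pvSBB (s : List Char) : Prop :=
  ∃ p < s.length, ∃ q < s.length, ∃ r < s.length,
    p < q ∧ q < r ∧ s[p]! = '{' ∧ s[q]! = '*' ∧ s[r]! = '{'

-- Pre_ excludes templates in which some closed chunk contains an opening brace, later an
-- asterisk, and later another opening brace (a stray opening brace inside a brace group's
-- partial text): on such malformed nesting A keeps collecting partial characters while
-- discarding the token, B reparses the group from its last opening brace, and neither
-- reading is more specified than the other.
def Pre_analyze_template (template_str : String) : Prop :=
  ∀ s ∈ (PySem.Chars.splitOn template_str.toList ['}']).dropLast, ¬ pvSBB s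
instance (template_str : String) : Decidable (Pre_analyze_template template_str) := by
  unfold Pre_analyze_template pvSBB; infer_instance

def pvWitness_analyze_template : String := "{name}"

-- helper for D_: the chunk contains an asterisk preceded by an opening brace (the group opens
-- a partial); applied to a chunk's dropLast it says the group also contributes a partial character
def pvGrp (s : List Char) : Prop := ∃ q < s.length, s[q]! = '*' ∧ '{' ∈ s.take q

-- On templates where some closed brace group contains an asterisk and an earlier closed group already
-- contributed partial characters, A returns the earlier partial text concatenated into the later
-- group's partial (current_partial is never cleared), while B returns each group's own partial
-- text only, which is the intended per-group parse.
def D_analyze_template (template_str : String) : Prop :=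
  let cs := (PySem.Chars.splitOn template_str.toList ['}']).dropLast
  ∃ i < cs.length, ∃ j < i, pvGrp (cs[i]!) ∧ pvGrp ((cs[j]!).dropLast)
instance (template_str : String) : Decidable (D_analyze_template template_str) := by
  unfold D_analyze_template pvGrp; infer_instance

def Spec_analyze_template (template_str : String) (out : List String × List String) : Prop :=
  ¬ D_analyze_template template_str → out = analyze_template_alt template_str
instance (template_str : String) (out : List String × List String) : Decidable (Spec_analyze_template template_str out) := by
  unfold Spec_analyze_template; infer_instance

def pvDiffWitness_analyze_template : String := "{a*b}{c*d}"
def pvDiffWitnessOut_analyze_template : (List String × List String) × (List String × List String) :=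
  ((["a", "c"], ["b", "bd"]), (["a", "c"], ["b", "d"]))

-- ===== CLAIM (what is proved, stated in full; the proofs are below) =====
def Claim_unchanged_analyze_template : Prop := ∀ (template_str : String), Dom_analyze_template template_str → Pre_analyze_template template_str → Spec_analyze_template template_str (analyze_template template_str)
def Claim_changed_analyze_template : Prop := Dom_analyze_template (pvDiffWitness_analyze_template) ∧ Pre_analyze_template (pvDiffWitness_analyze_template) ∧ D_analyze_template (pvDiffWitness_analyze_template) ∧ analyze_template (pvDiffWitness_analyze_template) = pvDiffWitnessOut_analyze_template.1 ∧ analyze_template_alt (pvDiffWitness_analyze_template) = pvDiffWitnessOut_analyze_template.2 ∧ pvDiffWitnessOut_analyze_template.1 ≠ pvDiffWitnessOut_analyze_template.2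
def Claim_exact_analyze_template : Prop := ∀ (template_str : String), Dom_analyze_template template_str → Pre_analyze_template template_str → D_analyze_template template_str → analyze_template template_str ≠ analyze_template_alt template_str

-- ===== LEMMAS AND PROOFS =====

-- Bool forms of the two segment patterns, used by the run characterizations
def pvStarts (s : List Char) : Bool := ((s.dropWhile (· ≠ '{')).tail).contains '*'
def pvContrib (s : List Char) : Bool :=
  ((((s.dropWhile (· ≠ '{')).tail).dropWhile (· ≠ '*')).tail).any (· ≠ '{')
-- Bool form of the Pre_ pattern
def pvSBBb (s : List Char) : Bool :=
  ((((s.dropWhile (· ≠ '{')).tail).dropWhile (· ≠ '*')).tail).contains '{'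

-- index formulations bridging pvBracePat to the Bool forms
def pvStartsIx (s : List Char) : Prop :=
  ∃ p < s.length, ∃ q < s.length, p < q ∧ s[p]! = '{' ∧ s[q]! = '*'
def pvContribIx (s : List Char) : Prop :=
  ∃ p < s.length, ∃ q < s.length, ∃ r < s.length,
    p < q ∧ q < r ∧ s[p]! = '{' ∧ s[q]! = '*' ∧ ¬ s[r]! = '{'

def pvSplitBr : List Char → List (List Char)
  | [] => [[]]
  | c :: r =>
    if c = '}' then [] :: pvSplitBr r
    else
      match pvSplitBr r with
      | s :: ss => (c :: s) :: ss
      | [] => [[c]]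

def pvSegsOf (t : String) : List (List Char) := (pvSplitBr t.toList).dropLast


def pvInner (s : List Char) : List Char := (s.dropWhile (· ≠ '{')).tail

def pvAfter (s : List Char) : List Char := ((pvInner s).dropWhile (· ≠ '*')).tail

def pvSegPart (s : List Char) : List Char := (pvAfter s).filter (· ≠ '{')

def pvSuffixBr (u : List Char) : List Char := (u.reverse.takeWhile (· ≠ '{')).reverse

def pvSegTok (s : List Char) : List Char :=
  if pvStarts s then
    (if (pvAfter s).contains '{' then [] else pvSuffixBr ((pvInner s).takeWhile (· ≠ '*')))
  else pvSuffixBr (pvInner s)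

def pvLastTok (ctok u : List Char) : List Char :=
  if u.contains '{' then pvSuffixBr u else ctok ++ u

theorem pvTakeWhile_all (a : Char) (u : List Char) (h : a ∉ u) : u.takeWhile (· ≠ a) = u := by
  rw [List.takeWhile_eq_self_iff]
  intro c hc
  simp only [decide_eq_true_eq]
  exact fun he => h (he ▸ hc)

theorem pvTakeWhile_ne_self (a : Char) (u : List Char) (h : a ∈ u) :
    ¬ (u.takeWhile (· ≠ a)).length = u.length := by
  intro hlen
  have heq : u.takeWhile (· ≠ a) = u :=
    (List.takeWhile_prefix _).eq_of_length hlen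
  have := List.takeWhile_eq_self_iff.mp heq a h
  simp at this

theorem pvSuffixBr_no_brace (u : List Char) (h : '{' ∉ u) : pvSuffixBr u = u := by
  unfold pvSuffixBr
  rw [pvTakeWhile_all _ _ (by simpa using h), List.reverse_reverse]

theorem pvLastTok_nil (u : List Char) : pvLastTok [] u = pvSuffixBr u := by
  unfold pvLastTok
  by_cases h : u.contains '{'
  · rw [if_pos h]
  · rw [if_neg h, List.nil_append, pvSuffixBr_no_brace]
    exact fun hm => h (List.contains_iff_mem.mpr hm)

theorem pvSuffixBr_brace_cons (x : List Char) : pvSuffixBr ('{' :: x) = pvSuffixBr x := by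
  by_cases hx : '{' ∈ x
  · unfold pvSuffixBr
    rw [List.reverse_cons, List.takeWhile_append]
    rw [if_neg (pvTakeWhile_ne_self _ _ (by simpa using hx))]
  · rw [pvSuffixBr_no_brace x hx]
    unfold pvSuffixBr
    rw [List.reverse_cons, List.takeWhile_append]
    rw [if_pos (by rw [pvTakeWhile_all _ _ (by simpa using hx)]), List.takeWhile_cons]
    simp

theorem pvSuffixBr_cons_of_brace (c : Char) (x : List Char) (hx : '{' ∈ x) :
    pvSuffixBr (c :: x) = pvSuffixBr x := by
  unfold pvSuffixBr
  rw [List.reverse_cons, List.takeWhile_append]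
  rw [if_neg (pvTakeWhile_ne_self _ _ (by simpa using hx))]

theorem pvSuffixBr_append_of_brace (a b : List Char) (h : '{' ∈ b) :
    pvSuffixBr (a ++ b) = pvSuffixBr b := by
  unfold pvSuffixBr
  rw [List.reverse_append, List.takeWhile_append]
  rw [if_neg (pvTakeWhile_ne_self _ _ (by simpa using h))]

theorem pvSuffixBr_append_no_brace (a b : List Char) (h : '{' ∉ b) :
    pvSuffixBr (a ++ b) = pvSuffixBr a ++ b := by
  unfold pvSuffixBr
  have hb : '{' ∉ b.reverse := by simpa using h
  rw [List.reverse_append, List.takeWhile_append]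
  rw [if_pos (by rw [pvTakeWhile_all _ _ hb])]
  rw [List.reverse_append, List.reverse_reverse]

theorem pvLastTok_brace (ctok x : List Char) : pvLastTok ctok ('{' :: x) = pvLastTok [] x := by
  rw [pvLastTok_nil]
  unfold pvLastTok
  rw [if_pos (by simp [List.contains_iff_mem])]
  exact pvSuffixBr_brace_cons x

theorem pvLastTok_cons (ctok : List Char) (c : Char) (x : List Char) (h : c ≠ '{') :
    pvLastTok ctok (c :: x) = pvLastTok (ctok ++ [c]) x := by
  unfold pvLastTok
  have hne : ('{' == c) = false := by
    simp only [beq_eq_false_iff_ne, ne_eq]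
    exact fun he => h he.symm
  have hcont : (c :: x).contains '{' = x.contains '{' := by
    rw [List.contains_cons, hne, Bool.false_or]
  rw [hcont]
  by_cases hx : x.contains '{'
  · rw [if_pos hx, if_pos hx]
    exact pvSuffixBr_cons_of_brace c x (List.contains_iff_mem.mp hx)
  · rw [if_neg hx, if_neg hx, List.append_assoc]
    simp

theorem pvContains_cons_ne (x : List Char) (a c : Char) (h : a ≠ c) :
    (c :: x).contains a = x.contains a := by
  have hne : (a == c) = false := by simpa using h
  rw [List.contains_cons, hne, Bool.false_or]

theorem pvRunA_pp (v : List Char) (h : '}' ∉ v) (tks pts : List String) (ctok cpart : List Char) :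
    v.foldl pvStepA (tks, pts, ctok, cpart, true, true) =
      (tks, pts, if v.contains '{' then [] else ctok, cpart ++ v.filter (· ≠ '{'), true, true) := by
  induction v generalizing ctok cpart with
  | nil => simp
  | cons c v' ih =>
    have hc : c ≠ '}' := fun he => h (by simp [he])
    have h' : '}' ∉ v' := fun hm => h (by simp [hm])
    by_cases hbr : c = '{'
    · subst hbr
      rw [List.foldl_cons]
      have hstep : pvStepA (tks, pts, ctok, cpart, true, true) '{' = (tks, pts, [], cpart, true, true) := by
        simp [pvStepA]
      rw [hstep, ih h' [] cpart]
      simp [List.contains_cons, List.filter_cons]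
    · rw [List.foldl_cons]
      have hstep : pvStepA (tks, pts, ctok, cpart, true, true) c = (tks, pts, ctok, cpart ++ [c], true, true) := by
        simp [pvStepA, hbr, hc]
      rw [hstep, ih h' ctok (cpart ++ [c])]
      rw [pvContains_cons_ne v' '{' c (fun he => hbr he.symm)]
      simp [List.filter_cons, hbr]

theorem pvRunA_tp (u : List Char) (h : '}' ∉ u) (tks pts : List String) (ctok cpart : List Char) :
    u.foldl pvStepA (tks, pts, ctok, cpart, true, false) =
      (tks, pts,
        (if u.contains '*' then
          (if (((u.dropWhile (· ≠ '*')).tail).contains '{') then []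
           else pvLastTok ctok (u.takeWhile (· ≠ '*')))
         else pvLastTok ctok u),
        cpart ++ ((u.dropWhile (· ≠ '*')).tail).filter (· ≠ '{'),
        true, u.contains '*') := by
  induction u generalizing ctok with
  | nil => simp [pvLastTok]
  | cons c u' ih =>
    have hc : c ≠ '}' := fun he => h (by simp [he])
    have h' : '}' ∉ u' := fun hm => h (by simp [hm])
    by_cases hst : c = '*'
    · subst hst
      rw [List.foldl_cons]
      have hstep : pvStepA (tks, pts, ctok, cpart, true, false) '*' = (tks, pts, ctok, cpart, true, true) := by
        simp [pvStepA]
      rw [hstep, pvRunA_pp u' h' tks pts ctok cpart]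
      have hco : ('*' :: u').contains '*' = true := by simp [List.contains_cons]
      have hdw : (('*' :: u').dropWhile (· ≠ '*')).tail = u' := by
        simp [List.dropWhile_cons]
      have htw : ('*' :: u').takeWhile (· ≠ '*') = [] := by
        simp [List.takeWhile_cons]
      rw [hco, hdw, htw, if_pos rfl]
      simp [pvLastTok]
    · by_cases hbr : c = '{'
      · subst hbr
        rw [List.foldl_cons]
        have hstep : pvStepA (tks, pts, ctok, cpart, true, false) '{' = (tks, pts, [], cpart, true, false) := by
          simp [pvStepA]
        rw [hstep, ih h' []]
        have hco : ('{' :: u').contains '*' = u'.contains '*' :=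
          pvContains_cons_ne u' '*' '{' (by decide)
        have hdw : (('{' :: u').dropWhile (· ≠ '*')).tail = (u'.dropWhile (· ≠ '*')).tail := by
          simp [List.dropWhile_cons]
        have htw : ('{' :: u').takeWhile (· ≠ '*') = '{' :: u'.takeWhile (· ≠ '*') := by
          simp [List.takeWhile_cons]
        rw [hco, hdw, htw, pvLastTok_brace, pvLastTok_nil]
        rw [pvLastTok_brace, pvLastTok_nil]
      · rw [List.foldl_cons]
        have hstep : pvStepA (tks, pts, ctok, cpart, true, false) c = (tks, pts, ctok ++ [c], cpart, true, false) := by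
          simp [pvStepA, hc, hbr, hst]
        rw [hstep, ih h' (ctok ++ [c])]
        have hco : (c :: u').contains '*' = u'.contains '*' :=
          pvContains_cons_ne u' '*' c (fun he => hst he.symm)
        have hdw : ((c :: u').dropWhile (· ≠ '*')).tail = (u'.dropWhile (· ≠ '*')).tail := by
          simp [List.dropWhile_cons, hst]
        have htw : (c :: u').takeWhile (· ≠ '*') = c :: u'.takeWhile (· ≠ '*') := by
          simp [List.takeWhile_cons, hst]
        rw [hco, hdw, htw, pvLastTok_cons ctok c _ hbr, pvLastTok_cons ctok c u' hbr]

theorem pvRunA_seg (s : List Char) (h : '}' ∉ s) (tks pts : List String) (ctok cpart : List Char) :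
    s.foldl pvStepA (tks, pts, ctok, cpart, false, false) =
      (tks, pts, if s.contains '{' then pvSegTok s else ctok, cpart ++ pvSegPart s,
        s.contains '{', pvStarts s) := by
  induction s generalizing ctok with
  | nil => simp [pvSegPart, pvAfter, pvInner, pvStarts]
  | cons c s' ih =>
    have hc : c ≠ '}' := fun he => h (by simp [he])
    have h' : '}' ∉ s' := fun hm => h (by simp [hm])
    by_cases hbr : c = '{'
    · subst hbr
      rw [List.foldl_cons]
      have hstep : pvStepA (tks, pts, ctok, cpart, false, false) '{' = (tks, pts, [], cpart, true, false) := by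
        simp [pvStepA]
      rw [hstep, pvRunA_tp s' h' tks pts [] cpart]
      have hinner : pvInner ('{' :: s') = s' := by
        simp [pvInner, List.dropWhile_cons]
      have hco : ('{' :: s').contains '{' = true := by simp [List.contains_cons]
      have hstarts : pvStarts ('{' :: s') = s'.contains '*' := by
        simp [pvStarts, List.dropWhile_cons]
      rw [hco, if_pos rfl, hstarts]
      have hafter : pvAfter ('{' :: s') = (s'.dropWhile (· ≠ '*')).tail := by
        rw [pvAfter, hinner]
      have hpart : pvSegPart ('{' :: s') = ((s'.dropWhile (· ≠ '*')).tail).filter (· ≠ '{') := by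
        rw [pvSegPart, hafter]
      rw [hpart]
      have htok : pvSegTok ('{' :: s') =
          (if s'.contains '*' then
            (if (((s'.dropWhile (· ≠ '*')).tail).contains '{') then []
             else pvLastTok [] (s'.takeWhile (· ≠ '*')))
           else pvLastTok [] s') := by
        rw [pvSegTok, hstarts, hafter, hinner, pvLastTok_nil, pvLastTok_nil]
      rw [htok]
    · rw [List.foldl_cons]
      have hstep : pvStepA (tks, pts, ctok, cpart, false, false) c = (tks, pts, ctok, cpart, false, false) := by
        simp [pvStepA, hc, hbr]
      rw [hstep, ih h' ctok]
      have hco : (c :: s').contains '{' = s'.contains '{' :=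
        pvContains_cons_ne s' '{' c (fun he => hbr he.symm)
      have hdw : (c :: s').dropWhile (· ≠ '{') = s'.dropWhile (· ≠ '{') := by
        simp [List.dropWhile_cons, hbr]
      have hinner : pvInner (c :: s') = pvInner s' := by rw [pvInner, hdw, pvInner]
      have hstarts : pvStarts (c :: s') = pvStarts s' := by
        rw [pvStarts, hdw, pvStarts]
      have hpart : pvSegPart (c :: s') = pvSegPart s' := by
        rw [pvSegPart, pvAfter, hinner, pvSegPart, pvAfter]
      have htok : pvSegTok (c :: s') = pvSegTok s' := by
        simp only [pvSegTok, pvAfter, hstarts, hinner]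
        rfl
      rw [hco, hstarts, hpart, htok]

theorem pvSplitBr_ne_nil (l : List Char) : pvSplitBr l ≠ [] := by
  cases l with
  | nil => simp [pvSplitBr]
  | cons c r =>
    simp only [pvSplitBr]
    split
    · simp
    · split <;> simp

theorem pvSplitBr_no_brace (l : List Char) (h : '}' ∉ l) : pvSplitBr l = [l] := by
  induction l with
  | nil => rfl
  | cons c r ih =>
    simp only [List.mem_cons, not_or] at h
    simp only [pvSplitBr, if_neg (fun hc : c = '}' => h.1 hc.symm), ih h.2]

theorem pvSplitBr_decomp (l : List Char) (h : '}' ∈ l) :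
    l = l.takeWhile (· ≠ '}') ++ '}' :: (l.dropWhile (· ≠ '}')).tail ∧
    pvSplitBr l = l.takeWhile (· ≠ '}') :: pvSplitBr ((l.dropWhile (· ≠ '}')).tail) := by
  induction l with
  | nil => simp at h
  | cons c r ih =>
    by_cases hc : c = '}'
    · subst hc
      constructor
      · simp [List.takeWhile, List.dropWhile]
      · simp [pvSplitBr, List.takeWhile, List.dropWhile]
    · have hr : '}' ∈ r := by
        rcases List.mem_cons.mp h with h | h
        · exact absurd h.symm hc
        · exact h
      obtain ⟨ih1, ih2⟩ := ih hr
      have ht : (c :: r).takeWhile (· ≠ '}') = c :: r.takeWhile (· ≠ '}') := by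
        simp [List.takeWhile, hc]
      have hd : (c :: r).dropWhile (· ≠ '}') = r.dropWhile (· ≠ '}') := by
        simp [List.dropWhile, hc]
      constructor
      · rw [ht, hd]; exact congrArg (c :: ·) ih1
      · rw [ht, hd]
        simp only [pvSplitBr, if_neg hc]
        rw [ih2]

def pvOutA : List (List Char) → List String → List String → List Char → List String × List String
  | [], tks, pts, _ => (tks, pts)
  | s :: ss, tks, pts, carry =>
    let cp := carry ++ pvSegPart s
    pvOutA ss
      (if s.contains '{' ∧ pvSegTok s ≠ [] then tks ++ [String.ofList (pvSegTok s)] else tks)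
      (if pvStarts s = true ∧ cp ≠ [] then pts ++ [String.ofList cp] else pts)
      cp

theorem pvStepA_brace (tks pts : List String) (ctok cpart : List Char) (ts ps : Bool) :
    pvStepA (tks, pts, ctok, cpart, ts, ps) '}' =
      (if ctok ≠ [] ∧ ts = true then tks ++ [String.ofList ctok] else tks,
       if cpart ≠ [] ∧ ps = true then pts ++ [String.ofList cpart] else pts,
       ctok, cpart, false, false) := by
  simp [pvStepA]

theorem pvMainA_aux (n : Nat) : ∀ l : List Char, l.length ≤ n → ∀ (tks pts : List String) (ctok cpart : List Char),
    (fun st : List String × List String × List Char × List Char × Bool × Bool => (st.1, st.2.1))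
        (l.foldl pvStepA (tks, pts, ctok, cpart, false, false)) =
      pvOutA ((pvSplitBr l).dropLast) tks pts cpart := by
  induction n with
  | zero =>
    intro l hl tks pts ctok cpart
    have : l = [] := List.length_eq_zero_iff.mp (Nat.le_zero.mp hl)
    subst this
    simp [pvSplitBr, pvOutA]
  | succ n ih =>
    intro l hl tks pts ctok cpart
    by_cases hbr : '}' ∈ l
    · obtain ⟨hdec, hsplit⟩ := pvSplitBr_decomp l hbr
      set s := l.takeWhile (· ≠ '}') with hs
      set r := (l.dropWhile (· ≠ '}')).tail with hr
      have hns : '}' ∉ s := by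
        intro hm
        have h2 := List.mem_takeWhile_imp hm
        simp at h2
      have hlen : r.length ≤ n := by
        have : l.length = s.length + 1 + r.length := by
          conv_lhs => rw [hdec]
          simp [List.length_append]
          omega
        omega
      conv_lhs => rw [hdec]
      rw [List.foldl_append, List.foldl_cons]
      rw [pvRunA_seg s hns tks pts ctok cpart]
      rw [pvStepA_brace]
      rw [ih r hlen]
      rw [hsplit]
      rw [List.dropLast_cons_of_ne_nil (pvSplitBr_ne_nil r)]
      have hrw : pvOutA (s :: (pvSplitBr r).dropLast) tks pts cpart =
          pvOutA ((pvSplitBr r).dropLast)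
            (if s.contains '{' ∧ pvSegTok s ≠ [] then tks ++ [String.ofList (pvSegTok s)] else tks)
            (if pvStarts s = true ∧ cpart ++ pvSegPart s ≠ [] then pts ++ [String.ofList (cpart ++ pvSegPart s)] else pts)
            (cpart ++ pvSegPart s) := rfl
      rw [hrw]
      have htk : (if (if s.contains '{' = true then pvSegTok s else ctok) ≠ [] ∧ s.contains '{' = true then
            tks ++ [String.ofList (if s.contains '{' = true then pvSegTok s else ctok)] else tks) =
          (if s.contains '{' ∧ pvSegTok s ≠ [] then tks ++ [String.ofList (pvSegTok s)] else tks) := by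
        by_cases h1 : s.contains '{' = true
        · rw [h1]
          by_cases h2 : pvSegTok s = [] <;> simp [h2]
        · have h1' : s.contains '{' = false := by simpa using h1
          rw [h1']
          simp
      have hpt : (if cpart ++ pvSegPart s ≠ [] ∧ pvStarts s = true then
            pts ++ [String.ofList (cpart ++ pvSegPart s)] else pts) =
          (if pvStarts s = true ∧ cpart ++ pvSegPart s ≠ [] then pts ++ [String.ofList (cpart ++ pvSegPart s)] else pts) := by
        by_cases hps : pvStarts s = true <;> by_cases hcp : cpart ++ pvSegPart s = [] <;>
          simp [hps, hcp]
      simp only [htk, hpt]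
    · rw [pvSplitBr_no_brace l hbr]
      rw [pvRunA_seg l hbr tks pts ctok cpart]
      simp [pvOutA]

theorem pvA_eq (t : String) : analyze_template t = pvOutA (pvSegsOf t) [] [] [] := by
  unfold analyze_template pvSegsOf
  exact pvMainA_aux t.toList.length t.toList le_rfl [] [] [] []

def pvOutB : List (List Char) → List String → List String → List String × List String
  | [], tks, pts => (tks, pts)
  | s :: ss, tks, pts =>
    pvOutB ss
      (if s.contains '{' ∧ pvSegTok s ≠ [] then tks ++ [String.ofList (pvSegTok s)] else tks)
      (if pvStarts s = true ∧ pvSegPart s ≠ [] then pts ++ [String.ofList (pvSegPart s)] else pts)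

theorem pvDropWhile_nil_of_not_mem (s : List Char) (a : Char) (h : a ∉ s) :
    s.dropWhile (· ≠ a) = [] := by
  rw [List.dropWhile_eq_nil_iff]
  intro x hx
  simp only [decide_eq_true_eq]
  exact fun he => h (he ▸ hx)

theorem pvDropWhile_head (p : Char → Bool) (l : List Char) {c : Char} {t : List Char}
    (h : l.dropWhile p = c :: t) : p c = false := by
  induction l with
  | nil => simp at h
  | cons a l' ih =>
    rw [List.dropWhile_cons] at h
    by_cases hp : p a = true
    · rw [if_pos hp] at h
      exact ih h
    · rw [if_neg hp] at h
      obtain ⟨h1, _⟩ := List.cons_eq_cons.mp h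
      subst h1
      simpa using hp

theorem pvDecomp (s : List Char) (h : '{' ∈ s) :
    s = s.takeWhile (· ≠ '{') ++ '{' :: pvInner s := by
  cases hd : s.dropWhile (· ≠ '{') with
  | nil =>
    have := List.dropWhile_eq_nil_iff.mp hd '{' h
    simp at this
  | cons c t =>
    have hc : c = '{' := by
      have := pvDropWhile_head _ _ hd
      simpa using this
    subst hc
    have hP : pvInner s = t := by rw [pvInner, hd]; rfl
    rw [hP]
    conv_lhs => rw [← List.takeWhile_append_dropWhile (p := fun c => decide (c ≠ '{')) (l := s)]
    rw [hd]

theorem pvSuffixBr_subset (w : List Char) : ∀ x ∈ pvSuffixBr w, x ∈ w := by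
  intro x hx
  unfold pvSuffixBr at hx
  rw [List.mem_reverse] at hx
  have := (List.takeWhile_sublist (l := w.reverse) (p := fun c => decide (c ≠ '{'))).subset hx
  rwa [List.mem_reverse] at this

-- new-B per-chunk step equals the per-chunk contribution of pvOutB, on chunks without the
-- excluded '{'…'*'…'{' pattern
theorem pvStepB_eq (tks pts : List String) (s : List Char) (hP : pvSBBb s = false) :
    pvStepB (tks, pts) s =
      ((if s.contains '{' ∧ pvSegTok s ≠ [] then tks ++ [String.ofList (pvSegTok s)] else tks),
       (if pvStarts s = true ∧ pvSegPart s ≠ [] then pts ++ [String.ofList (pvSegPart s)] else pts)) := by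
  by_cases hbr : s.contains '{' = true
  · have hbr' : '{' ∈ s := List.contains_iff_mem.mp hbr
    have hdec := pvDecomp s hbr'
    have hwr : (pvInner s).takeWhile (· ≠ '*') ++ (pvInner s).dropWhile (· ≠ '*') = pvInner s :=
      List.takeWhile_append_dropWhile
    have hWstar : '*' ∉ (pvInner s).takeWhile (· ≠ '*') := by
      intro hm
      have := List.mem_takeWhile_imp hm
      simp at this
    have hSfxStar : '*' ∉ pvSuffixBr ((pvInner s).takeWhile (· ≠ '*')) :=
      fun hm => hWstar (pvSuffixBr_subset _ _ hm)
    cases hr : (pvInner s).dropWhile (· ≠ '*') with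
    | nil =>
      have huw : pvInner s = (pvInner s).takeWhile (· ≠ '*') := by
        conv_lhs => rw [← hwr]
        rw [hr, List.append_nil]
      have hustar : '*' ∉ pvInner s := by rw [huw]; exact hWstar
      have hstarts : pvStarts s = false := by
        rw [pvStarts]
        simpa [List.contains_iff_mem, pvInner] using hustar
      have hv : (s.reverse.takeWhile (· ≠ '{')).reverse = pvSuffixBr (pvInner s) := by
        show pvSuffixBr s = _
        conv_lhs => rw [hdec]
        rw [pvSuffixBr_append_of_brace _ _ (by simp), pvSuffixBr_brace_cons]
      have hvstar : '*' ∉ pvSuffixBr (pvInner s) :=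
        fun hm => hustar (pvSuffixBr_subset _ _ hm)
      have htok : pvSegTok s = pvSuffixBr (pvInner s) := by
        rw [pvSegTok, hstarts]
        simp
      have hvc : (pvSuffixBr (pvInner s)).contains '*' = false := by
        simpa [List.contains_iff_mem] using hvstar
      simp only [pvStepB, hbr, if_true, hv]
      rw [pvTakeWhile_all _ _ hvstar, hvc]
      simp [hbr, hstarts, htok]
    | cons c r' =>
      have hc : c = '*' := by
        have := pvDropWhile_head _ _ hr
        simpa using this
      subst hc
      have hnbr' : '{' ∉ r' := by
        have : pvSBBb s = r'.contains '{' := by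
          rw [pvSBBb]
          show (((pvInner s).dropWhile (· ≠ '*')).tail).contains '{' = _
          rw [hr]
          rfl
        rw [this] at hP
        simpa [List.contains_iff_mem] using hP
      have hnbrRest : '{' ∉ '*' :: r' := by
        intro hm
        rcases List.mem_cons.mp hm with h1 | h1
        · exact absurd h1 (by decide)
        · exact hnbr' h1
      have hv : (s.reverse.takeWhile (· ≠ '{')).reverse =
          pvSuffixBr ((pvInner s).takeWhile (· ≠ '*')) ++ '*' :: r' := by
        show pvSuffixBr s = _
        conv_lhs => rw [hdec]
        rw [pvSuffixBr_append_of_brace _ _ (by simp), pvSuffixBr_brace_cons]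
        conv_lhs => rw [← hwr, hr]
        rw [pvSuffixBr_append_no_brace _ _ hnbrRest]
      have hstarts : pvStarts s = true := by
        rw [pvStarts]
        show (pvInner s).contains '*' = true
        rw [List.contains_iff_mem]
        conv_lhs => rw [← hwr, hr]
        simp
      have hafter : pvAfter s = r' := by
        rw [pvAfter, hr]
        rfl
      have htok : pvSegTok s = pvSuffixBr ((pvInner s).takeWhile (· ≠ '*')) := by
        rw [pvSegTok, hstarts, if_pos rfl, hafter]
        rw [if_neg (by simpa [List.contains_iff_mem] using hnbr')]
      have hpart : pvSegPart s = r' := by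
        rw [pvSegPart, hafter, List.filter_eq_self.mpr]
        intro x hx
        simp only [decide_eq_true_eq]
        exact fun he => hnbr' (he ▸ hx)
      simp only [pvStepB, hbr, if_true, hv]
      have htw : (pvSuffixBr ((pvInner s).takeWhile (· ≠ '*')) ++ '*' :: r').takeWhile (· ≠ '*') =
          pvSuffixBr ((pvInner s).takeWhile (· ≠ '*')) := by
        rw [List.takeWhile_append, if_pos (by rw [pvTakeWhile_all _ _ hSfxStar])]
        simp [List.takeWhile_cons]
      have hdw : ((pvSuffixBr ((pvInner s).takeWhile (· ≠ '*')) ++ '*' :: r').dropWhile (· ≠ '*')).tail = r' := by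
        rw [List.dropWhile_append]
        rw [pvDropWhile_nil_of_not_mem _ _ hSfxStar]
        simp [List.dropWhile_cons]
      have hco : (pvSuffixBr ((pvInner s).takeWhile (· ≠ '*')) ++ '*' :: r').contains '*' = true := by
        rw [List.contains_iff_mem]
        simp
      rw [htw, hdw, hco, ← htok, ← hpart]
      simp [hbr, hstarts]
  · have hnb : '{' ∉ s := fun hm => hbr (List.contains_iff_mem.mpr hm)
    have hdw : s.dropWhile (· ≠ '{') = [] := pvDropWhile_nil_of_not_mem _ _ hnb
    have hstarts : pvStarts s = false := by
      rw [pvStarts, hdw]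
      rfl
    simp [pvStepB, hbr, hstarts, hnb]

theorem pvMainB (cs : List (List Char)) (h : ∀ s ∈ cs, pvSBBb s = false) :
    ∀ (tks pts : List String), cs.foldl pvStepB (tks, pts) = pvOutB cs tks pts := by
  induction cs with
  | nil => intro tks pts; rfl
  | cons s ss ih =>
    intro tks pts
    rw [List.foldl_cons, pvStepB_eq _ _ _ (h s (List.mem_cons_self)),
      ih (fun x hx => h x (List.mem_cons_of_mem _ hx)), pvOutB]

def pvConsFirst (p : List Char) : List (List Char) → List (List Char)
  | [] => [p]
  | s :: ss => (p ++ s) :: ss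

theorem pvGo_eq (fuel : Nat) (l cur : List Char) (acc : List (List Char)) (h : l.length < fuel) :
    PySem.Chars.splitOn.go ['}'] fuel l cur acc =
      acc.reverse ++ pvConsFirst cur.reverse (pvSplitBr l) := by
  induction fuel generalizing l cur acc with
  | zero => omega
  | succ n ih =>
    cases l with
    | nil =>
      simp [PySem.Chars.splitOn.go, pvSplitBr, pvConsFirst]
    | cons c rest =>
      by_cases hc : c = '}'
      · subst hc
        have hpre : List.isPrefixOf ['}'] ('}' :: rest) = true := by
          simp [List.isPrefixOf]
        rw [PySem.Chars.splitOn.go]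
        simp only [hpre, if_true]
        rw [ih _ _ _ (by simpa using Nat.lt_of_succ_lt_succ h)]
        simp only [pvSplitBr, pvConsFirst, List.reverse_cons]
        cases hb : pvSplitBr rest with
        | nil => exact absurd hb (pvSplitBr_ne_nil rest)
        | cons s ss => simp [hb, pvConsFirst]
      · have hpre : List.isPrefixOf ['}'] (c :: rest) = false := by
          simp [List.isPrefixOf]; exact fun hq => hc hq.symm
        rw [PySem.Chars.splitOn.go]
        simp only [hpre, Bool.false_eq_true, if_false]
        rw [ih _ _ _ (by simpa using Nat.lt_of_succ_lt_succ h)]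
        simp only [List.reverse_cons, pvSplitBr, if_neg hc]
        congr 1
        cases hb : pvSplitBr rest with
        | nil => simp [hb, pvConsFirst]
        | cons s ss => simp [hb, pvConsFirst]

theorem pvSplitOn_eq (l : List Char) : PySem.Chars.splitOn l ['}'] = pvSplitBr l := by
  rw [PySem.Chars.splitOn]
  rw [pvGo_eq _ _ _ _ (by omega)]
  cases hb : pvSplitBr l with
  | nil => exact absurd hb (pvSplitBr_ne_nil l)
  | cons s ss => simp [hb, pvConsFirst]

-- index form of pvSBBb, bridging Pre_ to the Bool form
def pvStarBrIx (u : List Char) : Prop :=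
  ∃ q < u.length, ∃ r < u.length, q < r ∧ u[q]! = '*' ∧ u[r]! = '{'

theorem pvStarBrIx_iff (u : List Char) :
    pvStarBrIx u ↔ ((u.dropWhile (· ≠ '*')).tail).contains '{' = true := by
  induction u with
  | nil => simp [pvStarBrIx]
  | cons c u' ih =>
    by_cases hc : c = '*'
    · subst hc
      have hR : ((('*' :: u').dropWhile (· ≠ '*')).tail).contains '{' = u'.contains '{' := by
        simp [List.dropWhile_cons]
      rw [hR]
      constructor
      · rintro ⟨q, hq, r, hr, hqr, hcq, hcr⟩
        cases r with
        | zero => omega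
        | succ r' =>
          simp only [List.length_cons] at hr
          have hr2 : r' < u'.length := by omega
          rw [List.contains_iff_mem]
          rw [List.getElem!_cons_succ, getElem!_pos u' r' hr2] at hcr
          exact hcr ▸ List.getElem_mem hr2
      · intro hm
        rw [List.contains_iff_mem, List.mem_iff_getElem] at hm
        obtain ⟨r', hr', he⟩ := hm
        refine ⟨0, by simp, r' + 1, by simp; omega, by omega, by simp, ?_⟩
        rw [List.getElem!_cons_succ, getElem!_pos u' r' hr', he]
    · have hR : (((c :: u').dropWhile (· ≠ '*')).tail).contains '{' =
          ((u'.dropWhile (· ≠ '*')).tail).contains '{' := by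
        simp [List.dropWhile_cons, hc]
      rw [hR, ← ih]
      unfold pvStarBrIx
      constructor
      · rintro ⟨q, hq, r, hr, hqr, hcq, hcr⟩
        cases q with
        | zero => simp at hcq; exact absurd hcq hc
        | succ q' =>
          cases r with
          | zero => omega
          | succ r' =>
            simp only [List.length_cons] at hq hr
            refine ⟨q', by omega, r', by omega, by omega, ?_, ?_⟩
            · simpa [List.getElem!_cons_succ] using hcq
            · simpa [List.getElem!_cons_succ] using hcr
      · rintro ⟨q, hq, r, hr, hqr, hcq, hcr⟩
        exact ⟨q + 1, by simp; omega, r + 1, by simp; omega, by omega,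
          by simpa [List.getElem!_cons_succ] using hcq, by simpa [List.getElem!_cons_succ] using hcr⟩

theorem pvSBB_cons_of_ne (c : Char) (s : List Char) (h : c ≠ '{') :
    pvSBB (c :: s) ↔ pvSBB s := by
  unfold pvSBB
  constructor
  · rintro ⟨p, hp, q, hq, r, hr, hpq, hqr, hcp, hcq, hcr⟩
    cases p with
    | zero => simp at hcp; exact absurd hcp h
    | succ p' =>
      cases q with
      | zero => omega
      | succ q' =>
        cases r with
        | zero => omega
        | succ r' =>
          simp only [List.length_cons] at hp hq hr
          refine ⟨p', by omega, q', by omega, r', by omega, by omega, by omega, ?_, ?_, ?_⟩ <;>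
            simp only [List.getElem!_cons_succ] at hcp hcq hcr <;> assumption
  · rintro ⟨p, hp, q, hq, r, hr, hpq, hqr, hcp, hcq, hcr⟩
    exact ⟨p + 1, by simp; omega, q + 1, by simp; omega, r + 1, by simp; omega, by omega, by omega,
      by simpa [List.getElem!_cons_succ] using hcp,
      by simpa [List.getElem!_cons_succ] using hcq,
      by simpa [List.getElem!_cons_succ] using hcr⟩

theorem pvSBB_brace_iff (s : List Char) : pvSBB ('{' :: s) ↔ pvStarBrIx s := by
  constructor
  · rintro ⟨p, hp, q, hq, r, hr, hpq, hqr, hcp, hcq, hcr⟩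
    cases q with
    | zero => omega
    | succ q' =>
      cases r with
      | zero => omega
      | succ r' =>
        simp only [List.length_cons] at hq hr
        refine ⟨q', by omega, r', by omega, by omega, ?_, ?_⟩ <;>
          simp only [List.getElem!_cons_succ] at hcq hcr <;> assumption
  · rintro ⟨q, hq, r, hr, hqr, hcq, hcr⟩
    exact ⟨0, by simp, q + 1, by simp; omega, r + 1, by simp; omega, by omega, by omega, by simp,
      by simpa [List.getElem!_cons_succ] using hcq,
      by simpa [List.getElem!_cons_succ] using hcr⟩

theorem pvSBB_iff (s : List Char) : pvSBB s ↔ pvSBBb s = true := by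
  induction s with
  | nil => simp [pvSBB, pvSBBb]
  | cons c s' ih =>
    by_cases hc : c = '{'
    · subst hc
      have hR : pvSBBb ('{' :: s') = ((s'.dropWhile (· ≠ '*')).tail).contains '{' := by
        simp [pvSBBb, List.dropWhile_cons]
      rw [hR, pvSBB_brace_iff, pvStarBrIx_iff]
    · have hR : pvSBBb (c :: s') = pvSBBb s' := by
        simp [pvSBBb, List.dropWhile_cons, hc]
      rw [hR, pvSBB_cons_of_ne c s' hc, ih]

theorem pvB_eq (t : String) (hPre : Pre_analyze_template t) :
    analyze_template_alt t = pvOutB (pvSegsOf t) [] [] := by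
  unfold analyze_template_alt pvSegsOf
  rw [pvSplitOn_eq]
  apply pvMainB
  intro s hs
  have h2 : ¬ pvSBB s := hPre s (by rw [pvSplitOn_eq]; exact hs)
  cases h : pvSBBb s with
  | false => rfl
  | true => exact absurd ((pvSBB_iff s).mpr h) h2

def pvLeak : List Char → List (List Char) → Prop
  | _, [] => False
  | carry, s :: ss => (pvStarts s = true ∧ carry ≠ []) ∨ pvLeak (carry ++ pvSegPart s) ss

theorem pvContrib_iff (s : List Char) : pvContrib s = true ↔ pvSegPart s ≠ [] := by
  unfold pvContrib pvSegPart pvAfter pvInner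
  rw [List.any_eq_true]
  constructor
  · rintro ⟨x, hx, hpx⟩ hnil
    have : x ∈ List.filter (fun c => decide (c ≠ '{')) ((((s.dropWhile (· ≠ '{')).tail).dropWhile (· ≠ '*')).tail) := by
      rw [List.mem_filter]
      exact ⟨hx, hpx⟩
    rw [hnil] at this
    simp at this
  · intro hne
    obtain ⟨x, hx⟩ := List.exists_mem_of_ne_nil _ hne
    rw [List.mem_filter] at hx
    exact ⟨x, hx.1, hx.2⟩

theorem pvSegPart_nil_of_not_starts (s : List Char) (h : ¬ pvStarts s = true) : pvSegPart s = [] := by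
  have hdw : ((s.dropWhile (· ≠ '{')).tail).dropWhile (· ≠ '*') = [] :=
    pvDropWhile_nil_of_not_mem _ _ (by
      intro hm
      exact h (by simpa [pvStarts, List.contains_iff_mem] using hm))
  rw [pvSegPart, pvAfter, pvInner, hdw]
  rfl

theorem pvLeak_iff (cs : List (List Char)) : ∀ (carry : List Char),
    pvLeak carry cs ↔ ∃ i < cs.length, pvStarts (cs[i]!) = true ∧
      (carry ≠ [] ∨ ∃ j < i, pvContrib (cs[j]!) = true) := by
  induction cs with
  | nil => intro carry; simp [pvLeak]
  | cons s ss ih =>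
    intro carry
    rw [pvLeak, ih]
    constructor
    · rintro (⟨hst, hc⟩ | ⟨i, hi, hsti, hrest⟩)
      · exact ⟨0, by simp, by simpa using hst, Or.inl hc⟩
      · refine ⟨i + 1, by simpa using hi, by simpa using hsti, ?_⟩
        rcases hrest with hc | ⟨j, hj, hcj⟩
        · by_cases hcar : carry = []
          · subst hcar
            have hps : pvSegPart s ≠ [] := by
              intro hnil
              rw [hnil] at hc
              simp at hc
            exact Or.inr ⟨0, by omega, by simpa using (pvContrib_iff s).mpr hps⟩
          · exact Or.inl hcar
        · exact Or.inr ⟨j + 1, by omega, by simpa using hcj⟩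
    · rintro ⟨i, hi, hsti, hrest⟩
      cases i with
      | zero =>
        rcases hrest with hc | ⟨j, hj, _⟩
        · exact Or.inl ⟨by simpa using hsti, hc⟩
        · omega
      | succ i' =>
        refine Or.inr ⟨i', by simpa using hi, by simpa using hsti, ?_⟩
        rcases hrest with hc | ⟨j, hj, hcj⟩
        · left
          intro hnil
          exact hc (List.append_eq_nil_iff.mp hnil).1
        · cases j with
          | zero =>
            left
            intro hnil
            have := (pvContrib_iff s).mp (by simpa using hcj)
            exact this (List.append_eq_nil_iff.mp hnil).2
          | succ j' =>
            exact Or.inr ⟨j', by omega, by simpa using hcj⟩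

theorem pvUnchanged (cs : List (List Char)) : ∀ (tks pts : List String) (carry : List Char),
    ¬ pvLeak carry cs → pvOutA cs tks pts carry = pvOutB cs tks pts := by
  induction cs with
  | nil => intro tks pts carry _; rfl
  | cons s ss ih =>
    intro tks pts carry h
    rw [pvLeak] at h
    push_neg at h
    obtain ⟨h1, h2⟩ := h
    rw [pvOutA, pvOutB]
    by_cases hst : pvStarts s = true
    · have hcar : carry = [] := h1 hst
      subst hcar
      simp only [List.nil_append]
      exact ih _ _ _ (by simpa using h2)
    · have hsp : pvSegPart s = [] := pvSegPart_nil_of_not_starts s hst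
      rw [hsp]
      simp only [List.append_nil]
      rw [if_neg (fun hh : pvStarts s = true ∧ carry ≠ [] => hst hh.1),
          if_neg (fun hh : pvStarts s = true ∧ ¬([] : List Char) = [] => hst hh.1)]
      exact ih _ _ _ (by simpa [hsp] using h2)

def pvPartsA : List (List Char) → List Char → List String
  | [], _ => []
  | s :: ss, carry =>
    (if pvStarts s = true ∧ carry ++ pvSegPart s ≠ [] then [String.ofList (carry ++ pvSegPart s)] else [])
      ++ pvPartsA ss (carry ++ pvSegPart s)

def pvPartsB : List (List Char) → List String
  | [] => []
  | s :: ss =>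
    (if pvStarts s = true ∧ pvSegPart s ≠ [] then [String.ofList (pvSegPart s)] else []) ++ pvPartsB ss

theorem pvPartsA_spec (cs : List (List Char)) : ∀ (tks pts : List String) (carry : List Char),
    (pvOutA cs tks pts carry).2 = pts ++ pvPartsA cs carry := by
  induction cs with
  | nil => intro tks pts carry; simp [pvOutA, pvPartsA]
  | cons s ss ih =>
    intro tks pts carry
    rw [pvOutA, pvPartsA, ih]
    split
    · simp
    · simp

theorem pvPartsB_spec (cs : List (List Char)) : ∀ (tks pts : List String),
    (pvOutB cs tks pts).2 = pts ++ pvPartsB cs := by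
  induction cs with
  | nil => intro tks pts; simp [pvOutB, pvPartsB]
  | cons s ss ih =>
    intro tks pts
    rw [pvOutB, pvPartsB, ih]
    split
    · simp
    · simp

theorem pvParts_len (cs : List (List Char)) : ∀ (carry : List Char),
    (pvPartsB cs).length ≤ (pvPartsA cs carry).length := by
  induction cs with
  | nil => intro carry; simp [pvPartsA, pvPartsB]
  | cons s ss ih =>
    intro carry
    rw [pvPartsA, pvPartsB]
    simp only [List.length_append]
    have h1 : (if pvStarts s = true ∧ pvSegPart s ≠ [] then [String.ofList (pvSegPart s)] else []).length ≤
        (if pvStarts s = true ∧ carry ++ pvSegPart s ≠ [] then [String.ofList (carry ++ pvSegPart s)] else []).length := by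
      by_cases hb : pvStarts s = true ∧ pvSegPart s ≠ []
      · rw [if_pos hb, if_pos ⟨hb.1, by simp [hb.2]⟩]
        simp
      · rw [if_neg hb]
        simp
    have h2 := ih (carry ++ pvSegPart s)
    omega

theorem pvOfList_ne (a b : List Char) (h : a.length ≠ b.length) :
    String.ofList a ≠ String.ofList b := by
  intro he
  have : (String.ofList a).toList = (String.ofList b).toList := by rw [he]
  simp only [String.toList_ofList] at this
  exact h (by rw [this])

theorem pvTight (cs : List (List Char)) : ∀ (carry : List Char), pvLeak carry cs →
    pvPartsA cs carry ≠ pvPartsB cs := by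
  induction cs with
  | nil => intro carry h; exact absurd h (by simp [pvLeak])
  | cons s ss ih =>
    intro carry h
    rw [pvPartsA, pvPartsB]
    by_cases hl0 : pvStarts s = true ∧ carry ≠ []
    · obtain ⟨hst, hcar⟩ := hl0
      have hcp : carry ++ pvSegPart s ≠ [] := by
        intro hnil
        exact hcar (List.append_eq_nil_iff.mp hnil).1
      rw [if_pos ⟨hst, hcp⟩]
      by_cases hsp : pvSegPart s = []
      · rw [if_neg (fun hh => hh.2 hsp)]
        simp only [List.nil_append, List.singleton_append]
        intro he
        have hlen := congrArg List.length he
        simp only [List.length_cons] at hlen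
        have := pvParts_len ss (carry ++ pvSegPart s)
        omega
      · rw [if_pos ⟨hst, hsp⟩]
        simp only [List.singleton_append]
        intro he
        have hhd : String.ofList (carry ++ pvSegPart s) = String.ofList (pvSegPart s) := by
          exact (List.cons_eq_cons.mp he).1
        exact pvOfList_ne _ _ (by
          simp only [List.length_append]
          have : carry.length ≠ 0 := fun hz => hcar (List.length_eq_zero_iff.mp hz)
          omega) hhd
    · have hleak : pvLeak (carry ++ pvSegPart s) ss := by
        rcases h with h | h
        · exact absurd h hl0
        · exact h
      by_cases hst : pvStarts s = true
      · have hcar : carry = [] := by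
          by_contra hcar
          exact hl0 ⟨hst, hcar⟩
        subst hcar
        simp only [List.nil_append]
        intro he
        exact ih _ hleak (by
          rcases List.append_inj he (by rfl) with ⟨_, h2⟩
          exact h2)
      · have hsp : pvSegPart s = [] := pvSegPart_nil_of_not_starts s hst
        rw [if_neg (fun hh => hst hh.1), if_neg (fun hh => hst hh.1)]
        simp only [List.nil_append]
        exact ih _ hleak

theorem pvStartsIx_cons_of_ne (c : Char) (s : List Char) (h : c ≠ '{') :
    pvStartsIx (c :: s) ↔ pvStartsIx s := by
  unfold pvStartsIx
  constructor
  · rintro ⟨p, hp, q, hq, hpq, hcp, hcq⟩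
    cases p with
    | zero => simp at hcp; exact absurd hcp h
    | succ p' =>
      cases q with
      | zero => omega
      | succ q' =>
        simp only [List.length_cons] at hp hq
        refine ⟨p', by omega, q', by omega, by omega, ?_, ?_⟩
        · simpa [List.getElem!_cons_succ] using hcp
        · simpa [List.getElem!_cons_succ] using hcq
  · rintro ⟨p, hp, q, hq, hpq, hcp, hcq⟩
    exact ⟨p + 1, by simp; omega, q + 1, by simp; omega, by omega,
      by simpa [List.getElem!_cons_succ] using hcp, by simpa [List.getElem!_cons_succ] using hcq⟩

theorem pvStartsIx_iff (s : List Char) : pvStartsIx s ↔ pvStarts s = true := by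
  induction s with
  | nil => simp [pvStartsIx, pvStarts]
  | cons c s' ih =>
    by_cases hc : c = '{'
    · subst hc
      have hL : pvStarts ('{' :: s') = s'.contains '*' := by
        simp [pvStarts, List.dropWhile_cons]
      rw [hL]
      constructor
      · rintro ⟨p, hp, q, hq, hpq, hcp, hcq⟩
        cases q with
        | zero => omega
        | succ q' =>
          simp only [List.length_cons] at hq
          rw [List.contains_iff_mem, List.mem_iff_getElem]
          refine ⟨q', by omega, ?_⟩
          have := hcq
          rw [List.getElem!_cons_succ] at this
          rwa [← getElem!_pos ..]
      · intro hm
        rw [List.contains_iff_mem, List.mem_iff_getElem] at hm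
        obtain ⟨q', hq', he⟩ := hm
        refine ⟨0, by simp, q' + 1, by simp; omega, by omega, by simp, ?_⟩
        rw [List.getElem!_cons_succ, getElem!_pos ..]
        exact he
    · have hL : pvStarts (c :: s') = pvStarts s' := by
        simp [pvStarts, List.dropWhile_cons, hc]
      rw [hL, pvStartsIx_cons_of_ne c s' hc, ih]

def pvStarAfterIx (u : List Char) : Prop :=
  ∃ q < u.length, ∃ r < u.length, q < r ∧ u[q]! = '*' ∧ ¬ u[r]! = '{'

theorem pvStarAfterIx_iff (u : List Char) :
    pvStarAfterIx u ↔ ((u.dropWhile (· ≠ '*')).tail).any (· ≠ '{') = true := by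
  induction u with
  | nil => simp [pvStarAfterIx]
  | cons c u' ih =>
    by_cases hc : c = '*'
    · subst hc
      have hR : ((('*' :: u').dropWhile (· ≠ '*')).tail).any (· ≠ '{') = u'.any (· ≠ '{') := by
        simp [List.dropWhile_cons]
      rw [hR]
      constructor
      · rintro ⟨q, hq, r, hr, hqr, hcq, hcr⟩
        cases r with
        | zero => omega
        | succ r' =>
          simp only [List.length_cons] at hr
          rw [List.any_eq_true]
          have hr2 : r' < u'.length := by omega
          refine ⟨u'[r'], List.getElem_mem hr2, ?_⟩
          rw [List.getElem!_cons_succ, getElem!_pos u' r' hr2] at hcr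
          simpa using hcr
      · intro hm
        rw [List.any_eq_true] at hm
        obtain ⟨x, hx, hpx⟩ := hm
        rw [List.mem_iff_getElem] at hx
        obtain ⟨r', hr', he⟩ := hx
        refine ⟨0, by simp, r' + 1, by simp; omega, by omega, by simp, ?_⟩
        rw [List.getElem!_cons_succ, getElem!_pos u' r' hr', he]
        simpa using hpx
    · have hR : (((c :: u').dropWhile (· ≠ '*')).tail).any (· ≠ '{') =
          ((u'.dropWhile (· ≠ '*')).tail).any (· ≠ '{') := by
        simp [List.dropWhile_cons, hc]
      rw [hR, ← ih]
      unfold pvStarAfterIx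
      constructor
      · rintro ⟨q, hq, r, hr, hqr, hcq, hcr⟩
        cases q with
        | zero => simp at hcq; exact absurd hcq hc
        | succ q' =>
          cases r with
          | zero => omega
          | succ r' =>
            simp only [List.length_cons] at hq hr
            refine ⟨q', by omega, r', by omega, by omega, ?_, ?_⟩
            · simpa [List.getElem!_cons_succ] using hcq
            · simpa [List.getElem!_cons_succ] using hcr
      · rintro ⟨q, hq, r, hr, hqr, hcq, hcr⟩
        exact ⟨q + 1, by simp; omega, r + 1, by simp; omega, by omega,
          by simpa [List.getElem!_cons_succ] using hcq, by simpa [List.getElem!_cons_succ] using hcr⟩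

theorem pvContribIx_cons_of_ne (c : Char) (s : List Char) (h : c ≠ '{') :
    pvContribIx (c :: s) ↔ pvContribIx s := by
  unfold pvContribIx
  constructor
  · rintro ⟨p, hp, q, hq, r, hr, hpq, hqr, hcp, hcq, hcr⟩
    cases p with
    | zero => simp at hcp; exact absurd hcp h
    | succ p' =>
      cases q with
      | zero => omega
      | succ q' =>
        cases r with
        | zero => omega
        | succ r' =>
          simp only [List.length_cons] at hp hq hr
          refine ⟨p', by omega, q', by omega, r', by omega, by omega, by omega, ?_, ?_, ?_⟩ <;>
            simp only [List.getElem!_cons_succ] at hcp hcq hcr <;> assumption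
  · rintro ⟨p, hp, q, hq, r, hr, hpq, hqr, hcp, hcq, hcr⟩
    exact ⟨p + 1, by simp; omega, q + 1, by simp; omega, r + 1, by simp; omega, by omega, by omega,
      by simpa [List.getElem!_cons_succ] using hcp,
      by simpa [List.getElem!_cons_succ] using hcq,
      by simpa [List.getElem!_cons_succ] using hcr⟩

theorem pvContribIx_brace_iff (s : List Char) :
    pvContribIx ('{' :: s) ↔ pvStarAfterIx s := by
  constructor
  · rintro ⟨p, hp, q, hq, r, hr, hpq, hqr, hcp, hcq, hcr⟩
    cases q with
    | zero => omega
    | succ q' =>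
      cases r with
      | zero => omega
      | succ r' =>
        simp only [List.length_cons] at hq hr
        refine ⟨q', by omega, r', by omega, by omega, ?_, ?_⟩ <;>
          simp only [List.getElem!_cons_succ] at hcq hcr <;> assumption
  · rintro ⟨q, hq, r, hr, hqr, hcq, hcr⟩
    exact ⟨0, by simp, q + 1, by simp; omega, r + 1, by simp; omega, by omega, by omega, by simp,
      by simpa [List.getElem!_cons_succ] using hcq,
      by simpa [List.getElem!_cons_succ] using hcr⟩

theorem pvContribIx_iff (s : List Char) : pvContribIx s ↔ pvContrib s = true := by
  induction s with
  | nil => simp [pvContribIx, pvContrib]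
  | cons c s' ih =>
    by_cases hc : c = '{'
    · subst hc
      have hR : pvContrib ('{' :: s') = ((s'.dropWhile (· ≠ '*')).tail).any (· ≠ '{') := by
        simp [pvContrib, List.dropWhile_cons]
      rw [hR, pvContribIx_brace_iff, pvStarAfterIx_iff]
    · have hR : pvContrib (c :: s') = pvContrib s' := by
        simp [pvContrib, List.dropWhile_cons, hc]
      rw [hR, pvContribIx_cons_of_ne c s' hc, ih]

theorem pvGrp_iff (s : List Char) : pvGrp s ↔ pvStartsIx s := by
  unfold pvGrp pvStartsIx
  constructor
  · rintro ⟨q, hq, hcq, hmem⟩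
    rw [List.mem_take_iff_getElem] at hmem
    obtain ⟨p, hp, he⟩ := hmem
    exact ⟨p, by omega, q, hq, by omega, by rw [getElem!_pos s p (by omega)]; exact he, hcq⟩
  · rintro ⟨p, hp, q, hq, hpq, hcp, hcq⟩
    refine ⟨q, hq, hcq, ?_⟩
    rw [List.mem_take_iff_getElem]
    exact ⟨p, by omega, by rw [← getElem!_pos s p hp]; exact hcp⟩

theorem pvTakeDropLast (s : List Char) (q : Nat) (h : q ≤ s.length - 1) :
    s.dropLast.take q = s.take q := by
  rw [List.dropLast_eq_take, List.take_take, min_eq_left h]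

theorem pvGetDropLast (s : List Char) (q : Nat) (h : q < s.length - 1) :
    s.dropLast[q]! = s[q]! := by
  have h1 : q < s.dropLast.length := by rw [List.length_dropLast]; omega
  rw [getElem!_pos s.dropLast q h1, getElem!_pos s q (by omega), List.getElem_dropLast]

theorem pvGrpC_iff (s : List Char) (hs : ¬ pvSBB s) : pvGrp s.dropLast ↔ pvContribIx s := by
  unfold pvGrp pvContribIx
  constructor
  · rintro ⟨q, hq, hcq, hmem⟩
    rw [List.length_dropLast] at hq
    rw [pvGetDropLast s q hq] at hcq
    rw [pvTakeDropLast s q (by omega), List.mem_take_iff_getElem] at hmem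
    obtain ⟨p, hp, he⟩ := hmem
    have hp' : s[p]! = '{' := by rw [getElem!_pos s p (by omega)]; exact he
    have hr : ¬ s[q + 1]! = '{' := fun hbad =>
      hs ⟨p, by omega, q, by omega, q + 1, by omega, by omega, by omega, hp', hcq, hbad⟩
    exact ⟨p, by omega, q, by omega, q + 1, by omega, by omega, by omega, hp', hcq, hr⟩
  · rintro ⟨p, hp, q, hq, r, hr, hpq, hqr, hcp, hcq, hcr⟩
    have hq1 : q < s.length - 1 := by omega
    refine ⟨q, by rw [List.length_dropLast]; omega, ?_, ?_⟩
    · rw [pvGetDropLast s q hq1]; exact hcq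
    · rw [pvTakeDropLast s q (by omega), List.mem_take_iff_getElem]
      exact ⟨p, by omega, by rw [← getElem!_pos s p hp]; exact hcp⟩

theorem pvD_iff (t : String) (hPre : Pre_analyze_template t) :
    D_analyze_template t ↔ pvLeak [] (pvSegsOf t) := by
  unfold Pre_analyze_template at hPre
  rw [pvLeak_iff]
  unfold D_analyze_template pvSegsOf
  simp only [pvSplitOn_eq] at hPre ⊢
  have hmem : ∀ k, k < ((pvSplitBr t.toList).dropLast).length →
      ¬ pvSBB (((pvSplitBr t.toList).dropLast)[k]!) := by
    intro k hk
    apply hPre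
    rw [getElem!_pos _ k hk]
    exact List.getElem_mem hk
  constructor
  · rintro ⟨i, hi, j, hj, hsti, hcj⟩
    exact ⟨i, hi, (pvStartsIx_iff _).mp ((pvGrp_iff _).mp hsti),
      Or.inr ⟨j, hj, (pvContribIx_iff _).mp ((pvGrpC_iff _ (hmem j (by omega))).mp hcj)⟩⟩
  · rintro ⟨i, hi, hsti, hrest⟩
    rcases hrest with hc | ⟨j, hj, hcj⟩
    · simp at hc
    · exact ⟨i, hi, j, hj, (pvGrp_iff _).mpr ((pvStartsIx_iff _).mpr hsti),
      (pvGrpC_iff _ (hmem j (by omega))).mpr ((pvContribIx_iff _).mpr hcj)⟩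

-- ===== VERDICT (by name: the statement is the Claim_ definition above) =====
theorem analyze_template_spec : Claim_unchanged_analyze_template := by
  intro t _ hPre hD
  rw [pvA_eq, pvB_eq t hPre]
  exact pvUnchanged _ _ _ _ (fun hl => hD ((pvD_iff t hPre).mpr hl))

set_option maxRecDepth 100000 in
theorem analyze_template_changed : Claim_changed_analyze_template := by
  unfold Claim_changed_analyze_template
  refine ⟨by decide, by decide, ?_, by decide, by decide, by decide⟩
  rw [pvD_iff _ (by decide)]
  have hseg : pvSegsOf pvDiffWitness_analyze_template =
      [['{', 'a', '*', 'b'], ['{', 'c', '*', 'd']] := by decide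
  rw [hseg]
  exact Or.inr (Or.inl ⟨by decide, by decide⟩)

theorem analyze_template_tight : Claim_exact_analyze_template := by
  intro t _ hPre hD heq
  have h2 := congrArg Prod.snd heq
  rw [pvA_eq, pvB_eq t hPre, pvPartsA_spec, pvPartsB_spec] at h2
  exact pvTight _ _ ((pvD_iff t hPre).mp hD) (by simpa using h2)
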